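-- pv_equiv track=rewrite | github.com/hammersurf221/ChessGUI | external/python/fen_tracker/utils/board_utils.py | matrix_to_fen
-- ===== SOURCE A (Python) =====
-- IDX_TO_PIECE = {
--     0: '.', 1: 'P', 2: 'N', 3: 'B', 4: 'R', 5: 'Q', 6: 'K',
--     7: 'p', 8: 'n', 9: 'b', 10: 'r', 11: 'q', 12: 'k'
-- }
--
-- def matrix_to_fen(board):
--     fen_rows = []
--     for row in board:
--         row_fen = ''
--         empty = 0
--         for square in row:
--             piece = IDX_TO_PIECE[square]
--             if piece == '.':
--                 empty += 1
--             else: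
--                 if empty:
--                     row_fen += str(empty)
--                     empty = 0
--                 row_fen += piece
--         if empty:
--             row_fen += str(empty)
--         fen_rows.append(row_fen)
--     return '/'.join(fen_rows)
-- ===== SOURCE B (Python) =====
-- IDX_TO_PIECE = {
--     0: '.', 1: 'P', 2: 'N', 3: 'B', 4: 'R', 5: 'Q', 6: 'K',
--     7: 'p', 8: 'n', 9: 'b', 10: 'r', 11: 'q', 12: 'k'
-- }
--
-- PIECES = ".PNBRQKpnbrqk"
--
--
-- def _compress(row_str):
--     # second phase: replace each maximal run of '.' by its length
--     out = []
--     i = 0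
--     n = len(row_str)
--     while i < n:
--         if row_str[i] == '.':
--             j = i
--             while j < n and row_str[j] == '.':
--                 j += 1
--             out.append(str(j - i))
--             i = j
--         else:
--             out.append(row_str[i])
--             i += 1
--     return ''.join(out)
--
--
-- def matrix_to_fen(board):
--     # phase one: map every square to its raw character; phase two: compress dots
--     return '/'.join(_compress(''.join(PIECES[q] for q in row)) for row in board)
-- ===== Notes on version B (the rewrite author's own statement) =====
-- stated objective: alternative
-- what changed: Replaced the interleaved count-and-flush accumulator with a two-phase map-then-compress: each row is first mapped to a raw character string via an indexable piece table, then maximal runs of '.' are compressed to their lengths in a second pass; rows are joined with '/'.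
import Mathlib
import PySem

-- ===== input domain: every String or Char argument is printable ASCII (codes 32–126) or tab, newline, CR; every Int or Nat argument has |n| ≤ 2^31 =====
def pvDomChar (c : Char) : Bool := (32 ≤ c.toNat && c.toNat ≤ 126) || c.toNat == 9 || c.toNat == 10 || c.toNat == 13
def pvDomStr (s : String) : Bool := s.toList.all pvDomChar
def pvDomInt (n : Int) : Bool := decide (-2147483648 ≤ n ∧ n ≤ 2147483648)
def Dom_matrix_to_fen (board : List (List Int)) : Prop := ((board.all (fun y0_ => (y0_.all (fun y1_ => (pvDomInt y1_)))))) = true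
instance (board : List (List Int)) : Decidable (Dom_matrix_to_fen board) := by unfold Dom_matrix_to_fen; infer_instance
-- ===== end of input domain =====

-- B re-implements matrix_to_fen as a two-phase map-then-compress instead of A's interleaved count-and-flush accumulator (alternative decomposition, same cost).


-- ===== PORT A =====
def pvIdxToPiece : PySem.Dict Int String :=
  PySem.Dict.ofList [(0, "."), (1, "P"), (2, "N"), (3, "B"), (4, "R"), (5, "Q"), (6, "K"),
                     (7, "p"), (8, "n"), (9, "b"), (10, "r"), (11, "q"), (12, "k")]

-- literal transliteration of A; the dict lookup IDX_TO_PIECE[square] raises KeyError for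
-- squares outside 0..12 — those inputs are excluded by Pre_, the getD default is never used there
def matrix_to_fen (board : List (List Int)) : String :=
  let fen_rows : List String := board.foldl (fun fen_rows row =>
    let st : String × Int := row.foldl (fun (st : String × Int) square =>
      let piece := PySem.Dict.getD pvIdxToPiece square "."
      if piece = "." then (st.1, st.2 + 1)
      else
        let row_fen := if st.2 ≠ 0 then st.1 ++ PySem.Int.toStr st.2 else st.1
        (row_fen ++ piece, 0)) ("", 0)
    let row_fen := if st.2 ≠ 0 then st.1 ++ PySem.Int.toStr st.2 else st.1
    fen_rows ++ [row_fen]) []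
  PySem.Str.join "/" fen_rows

-- ===== PORT B =====
def pvPieces : List Char := ['.', 'P', 'N', 'B', 'R', 'Q', 'K', 'p', 'n', 'b', 'r', 'q', 'k']

-- PIECES[q]; Python raises IndexError outside range — excluded by Pre_, default never used there
def pvPieceChar (q : Int) : Char := (PySem.List.pyGet? pvPieces q).getD '?'

-- second phase of Source B: replace each maximal run of '.' by its length
def pvCompress : List Char → String
  | [] => ""
  | c :: rest =>
    if c = '.' then
      PySem.Int.toStr (1 + (rest.takeWhile (· = '.')).length) ++ pvCompress (rest.dropWhile (· = '.'))
    else String.mk [c] ++ pvCompress rest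
  termination_by s => s.length
  decreasing_by
    · simpa using Nat.lt_succ_of_le (List.length_dropWhile_le _ _)
    · simp

def matrix_to_fen_alt (board : List (List Int)) : String :=
  PySem.Str.join "/" (board.map (fun row => pvCompress (row.map pvPieceChar)))

-- ===== PRECONDITION & SPEC =====
-- Pre_ excludes exactly the inputs where A raises KeyError: a square outside 0..12.
def Pre_matrix_to_fen (board : List (List Int)) : Prop :=
  ∀ row ∈ board, ∀ q ∈ row, 0 ≤ q ∧ q ≤ 12
instance (board : List (List Int)) : Decidable (Pre_matrix_to_fen board) := by
  unfold Pre_matrix_to_fen; infer_instance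
def pvWitness_matrix_to_fen : List (List Int) := [[0, 1, 0, 0, 12], [4, 0]]

def Spec_matrix_to_fen (board : List (List Int)) (out : String) : Prop := out = matrix_to_fen_alt board
instance (board : List (List Int)) (out : String) : Decidable (Spec_matrix_to_fen board out) := by unfold Spec_matrix_to_fen; infer_instance

-- ===== CLAIM (what is proved, stated in full; the proofs are below) =====
def Claim_equal_matrix_to_fen : Prop := ∀ (board : List (List Int)), Dom_matrix_to_fen board → Pre_matrix_to_fen board → Spec_matrix_to_fen board (matrix_to_fen board)

-- ===== LEMMAS AND PROOFS =====

-- the piece string for a valid square, as A's dict sees it and as B's char sees it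
lemma piece_eq (q : Int) (h0 : 0 ≤ q) (h1 : q ≤ 12) :
    PySem.Dict.getD pvIdxToPiece q "." = String.mk [pvPieceChar q] := by
  interval_cases q <;> decide

lemma piece_dot_iff (q : Int) (h0 : 0 ≤ q) (h1 : q ≤ 12) :
    (PySem.Dict.getD pvIdxToPiece q "." = ".") ↔ pvPieceChar q = '.' := by
  interval_cases q <;> decide

lemma takeWhile_replicate_dots (m : Nat) (c : Char) (hc : ¬ c = '.') (l : List Char) :
    ((List.replicate m '.' ++ c :: l).takeWhile (· = '.')) = List.replicate m '.' := by
  induction m with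
  | zero => simp [hc]
  | succ m ih => simp [List.replicate_succ, ih]

lemma dropWhile_replicate_dots (m : Nat) (c : Char) (hc : ¬ c = '.') (l : List Char) :
    ((List.replicate m '.' ++ c :: l).dropWhile (· = '.')) = c :: l := by
  induction m with
  | zero => simp [hc]
  | succ m ih => simp [List.replicate_succ, ih]

lemma compress_replicate (n : Nat) :
    pvCompress (List.replicate n '.') = if n = 0 then "" else PySem.Int.toStr (n : Int) := by
  cases n with
  | zero => simp [pvCompress]
  | succ m =>
    rw [List.replicate_succ, pvCompress]
    simp [pvCompress]
    congr 1
    omega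

lemma compress_dots_cons (n : Nat) (c : Char) (hc : ¬ c = '.') (l : List Char) :
    pvCompress (List.replicate n '.' ++ c :: l) =
      (if n = 0 then "" else PySem.Int.toStr (n : Int)) ++ (String.mk [c] ++ pvCompress l) := by
  cases n with
  | zero => simp [pvCompress, hc]
  | succ m =>
    rw [List.replicate_succ, List.cons_append, pvCompress]
    rw [if_pos rfl, takeWhile_replicate_dots m c hc l, dropWhile_replicate_dots m c hc l,
        pvCompress, if_neg hc]
    simp only [List.length_replicate, if_neg (Nat.succ_ne_zero m)]
    congr 2
    omega

-- A's inner loop from state (s, replicate-count e) equals s ++ compress of e dots plus the mapped row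
lemma inner_loop_eq (row : List Int) (hrow : ∀ q ∈ row, 0 ≤ q ∧ q ≤ 12)
    (s : String) (e : Nat) :
    (let st := row.foldl (fun (st : String × Int) square =>
        let piece := PySem.Dict.getD pvIdxToPiece square "."
        if piece = "." then (st.1, st.2 + 1)
        else
          let row_fen := if st.2 ≠ 0 then st.1 ++ PySem.Int.toStr st.2 else st.1
          (row_fen ++ piece, 0)) (s, (e : Int))
     if st.2 ≠ 0 then st.1 ++ PySem.Int.toStr st.2 else st.1)
    = s ++ pvCompress (List.replicate e '.' ++ row.map pvPieceChar) := by
  induction row generalizing s e with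
  | nil =>
    simp only [List.foldl_nil, List.map_nil, List.append_nil, compress_replicate]
    cases e with
    | zero => simp
    | succ m => simp; intro h; omega
  | cons q rest ih =>
    obtain ⟨hq0, hq1⟩ := hrow q (List.mem_cons_self ..)
    have hrest : ∀ x ∈ rest, 0 ≤ x ∧ x ≤ 12 := fun x hx => hrow x (List.mem_cons_of_mem _ hx)
    simp only [List.foldl_cons, List.map_cons]
    by_cases hdot : PySem.Dict.getD pvIdxToPiece q "." = "."
    · have hc : pvPieceChar q = '.' := (piece_dot_iff q hq0 hq1).mp hdot
      rw [if_pos hdot]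
      have : ((e : Int) + 1) = ((e + 1 : Nat) : Int) := by push_cast; ring
      rw [this, ih hrest s (e + 1)]
      rw [hc]
      have hl : List.replicate (e + 1) '.' ++ rest.map pvPieceChar
          = List.replicate e '.' ++ '.' :: rest.map pvPieceChar := by
        rw [List.replicate_succ']; simp
      rw [hl]
    · have hc : ¬ pvPieceChar q = '.' := fun h => hdot ((piece_dot_iff q hq0 hq1).mpr h)
      rw [if_neg hdot, piece_eq q hq0 hq1]
      have hih := ih hrest ((if (e : Int) ≠ 0 then s ++ PySem.Int.toStr (e : Int) else s) ++ String.mk [pvPieceChar q]) 0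
      simp only [Nat.cast_zero] at hih
      rw [hih]
      simp only [List.replicate_zero, List.nil_append]
      rw [compress_dots_cons e _ hc]
      cases e with
      | zero => simp [String.append_assoc]
      | succ m =>
        rw [if_pos (by push_cast; omega : ¬(((m + 1 : Nat) : Int) = 0)), if_neg (Nat.succ_ne_zero m)]
        simp [String.append_assoc]

-- one row of A equals one row of B
lemma row_eq (row : List Int) (hrow : ∀ q ∈ row, 0 ≤ q ∧ q ≤ 12) :
    (let st := row.foldl (fun (st : String × Int) square =>
        let piece := PySem.Dict.getD pvIdxToPiece square "."
        if piece = "." then (st.1, st.2 + 1)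
        else
          let row_fen := if st.2 ≠ 0 then st.1 ++ PySem.Int.toStr st.2 else st.1
          (row_fen ++ piece, 0)) ("", 0)
     if st.2 ≠ 0 then st.1 ++ PySem.Int.toStr st.2 else st.1)
    = pvCompress (row.map pvPieceChar) := by
  have := inner_loop_eq row hrow "" 0
  simpa using this

-- A's outer loop builds board.map of the row function
lemma outer_loop_eq (board : List (List Int)) (f : List Int → String) (acc : List String) :
    board.foldl (fun fen_rows row => fen_rows ++ [f row]) acc = acc ++ board.map f := by
  induction board generalizing acc with
  | nil => simp
  | cons r rest ih => simp [ih]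

-- ===== VERDICT (by name: the statement is the Claim_ definition above) =====
theorem matrix_to_fen_spec : Claim_equal_matrix_to_fen := by
  intro board _hdom hpre
  show matrix_to_fen board = matrix_to_fen_alt board
  unfold matrix_to_fen matrix_to_fen_alt
  rw [outer_loop_eq board _ []]
  simp only [List.nil_append]
  refine congrArg (PySem.Str.join "/") ?_
  apply List.map_congr_left
  intro row hrow
  exact row_eq row (hpre row hrow)
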